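-- pv_equiv track=rewrite | github.com/leochlon/procedural_chlon2026 | experiments/prediction3_checkpointing/checkpoint_mitigation_suite.py | insert_periodic_checkpoint
-- ===== SOURCE A (Python) =====
-- from typing import Dict, List, Optional, Tuple
--
-- def insert_periodic_checkpoint(filler: List[int], chk: List[int], every: int) -> List[int]:
--     if every <= 0 or not chk or len(filler) <= every:
--         return list(filler)
--     out: List[int] = []
--     i = 0
--     n = len(filler)
--     while i < n:
--         j = min(n, i + every)
--         out.extend(filler[i:j])
--         i = j
--         if i < n:
--             out.extend(chk)
--     return out
-- ===== SOURCE B (Python) =====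
-- def _chunks(xs, every):
--     if len(xs) <= every:
--         return [xs]
--     return [xs[:every]] + _chunks(xs[every:], every)
--
-- def insert_periodic_checkpoint(filler, chk, every):
--     if every <= 0 or not chk or len(filler) <= every:
--         return list(filler)
--     cs = _chunks(filler, every)
--     out = list(cs[0])
--     for c in cs[1:]:
--         out += chk
--         out += c
--     return out
-- ===== Notes on version B (the rewrite author's own statement) =====
-- stated objective: alternative
-- what changed: A interleaves slices and checkpoints in one imperative index loop with a conditional trailing test; B first splits the filler into chunks by structural recursion and then joins the chunks with chk as a separator, which suppresses the trailing checkpoint by construction.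
import Mathlib
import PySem

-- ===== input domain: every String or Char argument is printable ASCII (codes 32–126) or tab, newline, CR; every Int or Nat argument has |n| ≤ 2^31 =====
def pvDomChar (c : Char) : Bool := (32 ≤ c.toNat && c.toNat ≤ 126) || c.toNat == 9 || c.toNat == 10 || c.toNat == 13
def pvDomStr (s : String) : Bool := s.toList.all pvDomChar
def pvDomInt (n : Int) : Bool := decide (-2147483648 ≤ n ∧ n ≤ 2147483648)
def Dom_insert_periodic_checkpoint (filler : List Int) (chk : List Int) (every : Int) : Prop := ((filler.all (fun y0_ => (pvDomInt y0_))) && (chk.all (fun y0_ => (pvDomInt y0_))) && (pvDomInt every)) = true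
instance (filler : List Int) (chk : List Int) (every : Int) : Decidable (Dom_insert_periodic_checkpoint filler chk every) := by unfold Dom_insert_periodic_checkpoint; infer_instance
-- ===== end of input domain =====

-- B rebuilds the result as "chunk the filler, then join the chunks with chk as a separator"
-- instead of A's single index loop with a conditional trailing-checkpoint test; same cost, different decomposition.

-- ===== PORT A =====
-- A's while loop; `he : 1 ≤ every` is only what A's guard guarantees before the loop is entered
-- (it justifies termination: i strictly increases by min towards n).
def pvALoop (filler chk : List Int) (every n : Int) (he : 1 ≤ every) (i : Int) (hi : 0 ≤ i) (out : List Int) : List Int :=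
  if h : i < n then
    let j := min n (i + every)
    let out2 := out ++ PySem.List.slice filler (some i) (some j)
    if hj : j < n then
      pvALoop filler chk every n he j (by omega) (out2 ++ chk)
    else out2
  else out
termination_by (n - i).toNat
decreasing_by omega

def insert_periodic_checkpoint (filler : List Int) (chk : List Int) (every : Int) : List Int :=
  if h : every ≤ 0 ∨ chk = [] ∨ (filler.length : Int) ≤ every then filler
  else pvALoop filler chk every filler.length (by have h1 := (not_or.mp h).1; omega) 0 (by omega) []

-- ===== PORT B =====
-- helper _chunks of Source B; `he : 1 ≤ every` is guaranteed by B's guard before the helper is called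
-- (it justifies termination: xs[every:] is strictly shorter).
def pvChunks (xs : List Int) (every : Int) (he : 1 ≤ every) : List (List Int) :=
  if _hl : (xs.length : Int) ≤ every then [xs]
  else PySem.List.slice xs none (some every) :: pvChunks (PySem.List.slice xs (some every) none) every he
termination_by xs.length
decreasing_by
  rw [PySem.List.slice_from xs (by omega : (0:Int) ≤ every)]
  simp only [List.length_drop]
  omega

def insert_periodic_checkpoint_alt (filler : List Int) (chk : List Int) (every : Int) : List Int :=
  if h : every ≤ 0 ∨ chk = [] ∨ (filler.length : Int) ≤ every then filler
  else
    let cs := pvChunks filler every (by have h1 := (not_or.mp h).1; omega)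
    let out := PySem.List.pyGetD cs 0 []   -- cs[0]; cs is never empty, so the default is never used
    (PySem.List.slice cs (some 1) none).foldl (fun out c => out ++ chk ++ c) out

-- ===== PRECONDITION & SPEC =====
def Spec_insert_periodic_checkpoint (filler : List Int) (chk : List Int) (every : Int) (out : List Int) : Prop := out = insert_periodic_checkpoint_alt filler chk every
instance (filler : List Int) (chk : List Int) (every : Int) (out : List Int) : Decidable (Spec_insert_periodic_checkpoint filler chk every out) := by unfold Spec_insert_periodic_checkpoint; infer_instance

-- ===== CLAIM (what is proved, stated in full; the proofs are below) =====
def Claim_equal_insert_periodic_checkpoint : Prop := ∀ (filler : List Int) (chk : List Int) (every : Int), Dom_insert_periodic_checkpoint filler chk every → Spec_insert_periodic_checkpoint filler chk every (insert_periodic_checkpoint filler chk every)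

-- ===== LEMMAS AND PROOFS =====

-- common functional spec: chunk-and-join, written as one recursion
def pvSpec (chk : List Int) (every : Int) (he : 1 ≤ every) (xs : List Int) : List Int :=
  if (xs.length : Int) ≤ every then xs
  else xs.take every.toNat ++ chk ++ pvSpec chk every he (xs.drop every.toNat)
termination_by xs.length
decreasing_by simp only [List.length_drop]; omega

def pvJoin (chk : List Int) : List (List Int) → List Int
  | [] => []
  | c :: cs => cs.foldl (fun out c => out ++ chk ++ c) c

lemma pvFoldl_shift (chk a b : List Int) (cs : List (List Int)) :
    cs.foldl (fun out c => out ++ chk ++ c) (a ++ b) = a ++ cs.foldl (fun out c => out ++ chk ++ c) b := by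
  induction cs generalizing b with
  | nil => rfl
  | cons c cs ih =>
    simp only [List.foldl_cons]
    rw [List.append_assoc, List.append_assoc, ← List.append_assoc b, ← ih]

lemma pvJoin_cons (chk c c2 : List Int) (cs : List (List Int)) :
    pvJoin chk (c :: c2 :: cs) = c ++ chk ++ pvJoin chk (c2 :: cs) := by
  simp only [pvJoin, List.foldl_cons]
  rw [pvFoldl_shift chk (c ++ chk) c2 cs]

lemma pvChunks_ne_nil (xs : List Int) (every : Int) (he : 1 ≤ every) :
    pvChunks xs every he ≠ [] := by
  rw [pvChunks]; split <;> simp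

lemma pvJoin_chunks (chk xs : List Int) (every : Int) (he : 1 ≤ every) :
    pvJoin chk (pvChunks xs every he) = pvSpec chk every he xs := by
  rw [pvChunks, pvSpec]
  split
  · rfl
  · rename_i hl
    rw [PySem.List.slice_to xs (by omega : (0:Int) ≤ every), PySem.List.slice_from xs (by omega : (0:Int) ≤ every)]
    have ih := pvJoin_chunks chk (xs.drop every.toNat) every he
    rcases hcs : pvChunks (xs.drop every.toNat) every he with _ | ⟨c2, cs⟩
    · exact absurd hcs (pvChunks_ne_nil _ _ _)
    · rw [hcs] at ih
      rw [pvJoin_cons, ih]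
termination_by xs.length
decreasing_by simp only [List.length_drop]; omega

lemma pvALoop_eq (filler chk : List Int) (every : Int) (he : 1 ≤ every) :
    ∀ (k : Nat) (i : Int) (hi : 0 ≤ i), i < (filler.length : Int) →
      ((filler.length : Int) - i).toNat ≤ k → ∀ out,
      pvALoop filler chk every (filler.length : Int) he i hi out
        = out ++ pvSpec chk every he (filler.drop i.toNat) := by
  intro k
  induction k with
  | zero => intro i hi hlt hk; omega
  | succ k ih =>
    intro i hi hlt hk out
    rw [pvALoop]
    simp only [hlt, dite_true]
    have h0j : (0:Int) ≤ min (filler.length : Int) (i + every) := by omega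
    rw [PySem.List.slice_toNat filler hi h0j]
    have hlen : ((filler.drop i.toNat).length : Int) = (filler.length : Int) - i := by
      simp only [List.length_drop]; omega
    by_cases hj : min (filler.length : Int) (i + every) < (filler.length : Int)
    · -- another full chunk plus a checkpoint, then loop on
      have hje : min (filler.length : Int) (i + every) = i + every := by omega
      rw [hje] at hj
      simp only [hje, hj, dite_true]
      rw [ih (i + every) (by omega) (by omega) (by omega)]
      conv_rhs => rw [pvSpec]
      have : ¬ (((filler.drop i.toNat).length : Int) ≤ every) := by rw [hlen]; omega
      rw [if_neg this, List.drop_drop]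
      have h1 : (i + every).toNat - i.toNat = every.toNat := by omega
      have h2 : i.toNat + every.toNat = (i + every).toNat := by omega
      rw [h1, h2]
      simp [List.append_assoc]
    · -- last (possibly short) chunk, no trailing checkpoint
      have hje : min (filler.length : Int) (i + every) = (filler.length : Int) := by omega
      simp only [hj, dite_false]
      conv_rhs => rw [pvSpec]
      have : ((filler.drop i.toNat).length : Int) ≤ every := by rw [hlen]; omega
      rw [if_pos this]
      rw [hje]
      congr 1
      exact List.take_of_length_le (by simp only [List.length_drop]; omega)

-- ===== VERDICT (by name: the statement is the Claim_ definition above) =====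
theorem insert_periodic_checkpoint_spec : Claim_equal_insert_periodic_checkpoint := by
  intro filler chk every _
  unfold Spec_insert_periodic_checkpoint insert_periodic_checkpoint insert_periodic_checkpoint_alt
  split
  · rfl
  · rename_i h
    have he : 1 ≤ every := by have h1 := (not_or.mp h).1; omega
    have hn : (0:Int) < (filler.length : Int) := by
      have h3 := (not_or.mp (not_or.mp h).2).2; omega
    simp only
    rw [pvALoop_eq filler chk every _ filler.length 0 (by omega) hn (by omega) []]
    simp only [Int.toNat_zero, List.drop_zero, List.nil_append]
    rw [← pvJoin_chunks chk filler every he]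
    rcases hcs : pvChunks filler every he with _ | ⟨c, cs⟩
    · exact absurd hcs (pvChunks_ne_nil _ _ _)
    · rw [PySem.List.slice_from_one]
      simp [pvJoin, PySem.List.pyGetD]
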